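-- pv_equiv track=rewrite | github.com/ggogoeun-hub/DLThon | src/save_turn_results.py | insert_turns
-- ===== SOURCE A (Python) =====
-- def insert_turns(flat_text, boundaries):
--     """flat text에 boundary 위치마다 \\n 삽입"""
--     words = flat_text.split()
--     result = []
--     for i, w in enumerate(words):
--         if i in set(boundaries) and i > 0:
--             result.append('\n')
--         result.append(w)
--     return ' '.join(result).replace(' \n ', '\n')
-- ===== SOURCE B (Python) =====
-- def insert_turns(flat_text, boundaries):
--     """flat text에 boundary 위치마다 \n 삽입 — sorted cut indices + word-list slicing"""
--     words = flat_text.split()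
--     cuts = sorted({b for b in boundaries if 0 < b < len(words)})
--     segments = []
--     prev = 0
--     for b in cuts:
--         segments.append(' '.join(words[prev:b]))
--         prev = b
--     segments.append(' '.join(words[prev:]))
--     return '\n'.join(segments)
-- ===== Notes on version B (the rewrite author's own statement) =====
-- stated objective: faster
-- what changed: B splits into words, computes the sorted deduplicated in-range cut indices once, then slices the word list between consecutive cuts and joins the space-joined segments with newlines, instead of A's per-word loop that rebuilds set(boundaries) every iteration, appends '\n' sentinel entries and repairs them with a global replace(' \n ', '\n') pass.
import Mathlib
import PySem

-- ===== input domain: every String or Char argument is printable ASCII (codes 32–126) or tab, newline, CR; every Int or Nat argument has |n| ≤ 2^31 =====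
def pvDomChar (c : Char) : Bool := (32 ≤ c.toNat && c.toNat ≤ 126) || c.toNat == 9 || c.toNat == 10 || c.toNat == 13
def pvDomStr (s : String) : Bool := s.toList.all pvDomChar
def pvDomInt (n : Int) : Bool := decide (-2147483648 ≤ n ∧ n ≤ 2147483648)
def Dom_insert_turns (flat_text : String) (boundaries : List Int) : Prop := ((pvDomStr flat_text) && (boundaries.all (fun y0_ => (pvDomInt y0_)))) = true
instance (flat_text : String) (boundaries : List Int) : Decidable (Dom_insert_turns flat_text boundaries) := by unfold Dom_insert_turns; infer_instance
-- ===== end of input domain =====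

-- B computes the sorted deduplicated in-range cut indices once and joins sliced word segments with
-- newlines, instead of A's per-word loop with '\n' sentinel entries, ' '.join and a global replace pass.

-- ===== PORT A =====
def insert_turns (flat_text : String) (boundaries : List Int) : String :=
  let words := PySem.Str.split₀ flat_text
  let result := (PySem.List.enumerate words 0).foldl
    (fun (acc : List String) iw =>
      if decide (iw.1 ∈ PySem.Set.ofList boundaries) && decide (0 < iw.1)
      then acc ++ ["\n", iw.2] else acc ++ [iw.2]) []
  PySem.Str.replace (PySem.Str.join " " result) " \n " "\n"

-- ===== PORT B =====
def insert_turns_alt (flat_text : String) (boundaries : List Int) : String :=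
  let words := PySem.Str.split₀ flat_text
  let cuts := PySem.List.sorted
    (PySem.Set.ofList (boundaries.filter
      (fun b => decide (0 < b) && decide (b < PySem.List.len words)))) (fun x => x) false
  let st := cuts.foldl
    (fun (st : List String × Int) b =>
      (st.1 ++ [PySem.Str.join " " (PySem.List.slice words (some st.2) (some b))], b))
    ([], 0)
  PySem.Str.join "\n" (st.1 ++ [PySem.Str.join " " (PySem.List.slice words (some st.2) none)])

-- ===== PRECONDITION & SPEC =====
def Spec_insert_turns (flat_text : String) (boundaries : List Int) (out : String) : Prop := out = insert_turns_alt flat_text boundaries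
instance (flat_text : String) (boundaries : List Int) (out : String) : Decidable (Spec_insert_turns flat_text boundaries out) := by unfold Spec_insert_turns; infer_instance

-- ===== CLAIM (what is proved, stated in full; the proofs are below) =====
def Claim_equal_insert_turns : Prop := ∀ (flat_text : String) (boundaries : List Int), Dom_insert_turns flat_text boundaries → Spec_insert_turns flat_text boundaries (insert_turns flat_text boundaries)

-- ===== LEMMAS AND PROOFS =====

-- the boundary test A performs at word index i (A's operand order)
def pvF (bs : List Int) (i : Int) : Bool :=
  decide (i ∈ PySem.Set.ofList bs) && decide (0 < i)

-- a word produced by str.split(): nonempty, no whitespace characters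
def pvOK (w : List Char) : Prop := w ≠ [] ∧ ∀ c ∈ w, PySem.Chars.isspace c = false

-- the common canonical tail: separator ('\n' at a cut, ' ' otherwise) before each word from index i on
def pvTail (bs : List Int) : Int → List String → List Char
  | _, [] => []
  | i, w :: ws => (if pvF bs i then '\n' else ' ') :: w.toList ++ pvTail bs (i + 1) ws

-- A's tail before the replace pass: ' \n ' at a cut, ' ' otherwise
def pvT (bs : List Int) : Int → List String → List Char
  | _, [] => []
  | i, w :: ws => (if pvF bs i then [' ', '\n', ' '] else [' ']) ++ w.toList ++ pvT bs (i + 1) ws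

-- structural spec of .replace(' \n ', '\n')
def pvRepl : List Char → List Char
  | [] => []
  | c :: t => if [' ', '\n', ' '].isPrefixOf (c :: t) then '\n' :: pvRepl (t.drop 2) else c :: pvRepl t
termination_by l => l.length
decreasing_by all_goals (simp; try omega)

theorem pvRepl_go (fuel : Nat) : ∀ (l acc : List Char), l.length ≤ fuel →
    PySem.Chars.replace.go [' ', '\n', ' '] ['\n'] fuel l acc = acc.reverse ++ pvRepl l := by
  induction fuel with
  | zero =>
    intro l acc h
    have : l = [] := by cases l <;> simp_all
    subst this
    simp [PySem.Chars.replace.go, pvRepl]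
  | succ fuel ih =>
    intro l acc h
    cases l with
    | nil => simp [PySem.Chars.replace.go, pvRepl]
    | cons c t =>
      rw [PySem.Chars.replace.go]
      by_cases hp : [' ', '\n', ' '].isPrefixOf (c :: t) = true
      · simp only [hp, if_pos]
        rw [ih _ _ (by simp at h ⊢; omega)]
        rw [pvRepl, if_pos hp]
        simp
      · simp only [hp, Bool.false_eq_true]
        rw [ih t (c :: acc) (by simp at h ⊢; omega)]
        rw [pvRepl, if_neg hp]
        simp

theorem pvReplace_eq (l : List Char) :
    PySem.Chars.replace l [' ', '\n', ' '] ['\n'] = pvRepl l := by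
  rw [PySem.Chars.replace]
  simp only [List.isEmpty_cons, Bool.false_eq_true]
  exact pvRepl_go l.length l [] le_rfl

theorem pvRepl_word (w : List Char) (h : ∀ c ∈ w, PySem.Chars.isspace c = false) (r : List Char) :
    pvRepl (w ++ r) = w ++ pvRepl r := by
  induction w with
  | nil => simp
  | cons c w ih =>
    have hc : PySem.Chars.isspace c = false := h c (by simp)
    have hp : ¬ ([' ', '\n', ' '].isPrefixOf (c :: (w ++ r)) = true) := by
      intro hpre
      simp [List.isPrefixOf] at hpre
      have : c = ' ' := hpre.1.symm
      subst this
      simp [PySem.Chars.isspace] at hc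
    rw [List.cons_append, pvRepl, if_neg hp, ih (fun c hc' => h c (by simp [hc']))]
    simp

theorem pvJoin_cons_flat (sep a : List Char) (l : List (List Char)) :
    PySem.Chars.join sep (a :: l) = a ++ l.flatMap (fun x => sep ++ x) := by
  induction l generalizing a with
  | nil => simp [PySem.Chars.join_singleton]
  | cons b l ih => rw [PySem.Chars.join_cons_cons, ih b]; simp

-- A's flat result list, space-joined, is w0 followed by pvT
theorem pvA_tail (bs : List Int) (ws : List String) (i : Int) :
    ((PySem.List.enumerate ws i).flatMap
        (fun iw => if pvF bs iw.1 then [("\n" : String), iw.2] else [iw.2])).flatMap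
      (fun x => [' '] ++ x.toList) = pvT bs i ws := by
  induction ws generalizing i with
  | nil => simp [PySem.List.enumerate_nil, pvT]
  | cons w ws ih =>
    rw [PySem.List.enumerate_cons]
    by_cases h : pvF bs i
    · simp only [List.flatMap_cons, h, if_pos]
      rw [pvT, if_pos h]
      simp only [List.flatMap_append, ih]
      simp
    · simp only [List.flatMap_cons, h, Bool.false_eq_true]
      rw [pvT, if_neg h]
      simp only [List.flatMap_append, ih]
      simp

-- the replace pass turns pvT into pvTail
theorem pvRepl_T (bs : List Int) (ws : List String) (i : Int)
    (hok : ∀ w ∈ ws, pvOK w.toList) :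
    pvRepl (pvT bs i ws) = pvTail bs i ws := by
  induction ws generalizing i with
  | nil => simp [pvT, pvTail, pvRepl]
  | cons w ws ih =>
    have hw : pvOK w.toList := hok w (by simp)
    have hrest : ∀ v ∈ ws, pvOK v.toList := fun v hv => hok v (by simp [hv])
    by_cases h : pvF bs i
    · rw [pvT, if_pos h, pvTail, if_pos h]
      simp only [List.cons_append, List.nil_append]
      rw [pvRepl, if_pos (by simp [List.isPrefixOf])]
      simp only [List.drop_succ_cons, List.drop_zero]
      rw [pvRepl_word _ hw.2, ih _ hrest]
    · rw [pvT, if_neg h, pvTail, if_neg h]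
      simp only [List.cons_append, List.nil_append]
      obtain ⟨hne, hns⟩ := hw
      obtain ⟨c, t, hct⟩ := List.exists_cons_of_ne_nil hne
      have hcns : PySem.Chars.isspace c = false := hns c (by rw [hct]; simp)
      have hp : ¬ ([' ', '\n', ' '].isPrefixOf (' ' :: (w.toList ++ pvT bs (i + 1) ws)) = true) := by
        intro hpre
        rw [hct] at hpre
        simp [List.isPrefixOf] at hpre
        have : c = '\n' := hpre.1.symm
        subst this
        simp [PySem.Chars.isspace] at hcns
      rw [pvRepl, if_neg hp, pvRepl_word _ hns, ih _ hrest]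

-- words produced by split() are nonempty and whitespace-free
theorem pvSplitGo_ok (s : List Char) : ∀ (cur : List Char) (acc : List (List Char)),
    (∀ w ∈ acc, pvOK w) → (∀ c ∈ cur, PySem.Chars.isspace c = false) →
    ∀ w ∈ PySem.Chars.split₀.go s cur acc, pvOK w := by
  induction s with
  | nil =>
    intro cur acc hacc hcur w hw
    rw [PySem.Chars.split₀.go] at hw
    by_cases hc : cur.isEmpty = true
    · rw [if_pos hc] at hw
      exact hacc w (List.mem_reverse.mp hw)
    · rw [if_neg hc] at hw
      rcases List.mem_cons.mp (List.mem_reverse.mp hw) with h | h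
      · subst h
        refine ⟨by simpa using (by simpa [List.isEmpty_iff] using hc), ?_⟩
        intro c hc'
        exact hcur c (List.mem_reverse.mp hc')
      · exact hacc w h
  | cons c rest ih =>
    intro cur acc hacc hcur w hw
    rw [PySem.Chars.split₀.go] at hw
    by_cases hs : PySem.Chars.isspace c = true
    · rw [if_pos hs] at hw
      by_cases hc : cur.isEmpty = true
      · rw [if_pos hc] at hw
        exact ih [] acc hacc (by simp) w hw
      · rw [if_neg hc] at hw
        refine ih [] _ ?_ (by simp) w hw
        intro v hv
        rcases List.mem_cons.mp hv with h | h
        · subst h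
          refine ⟨by simpa using (by simpa [List.isEmpty_iff] using hc), ?_⟩
          intro d hd
          exact hcur d (List.mem_reverse.mp hd)
        · exact hacc v h
    · rw [if_neg hs] at hw
      refine ih (c :: cur) acc hacc ?_ w hw
      intro d hd
      rcases List.mem_cons.mp hd with h | h
      · subst h; simpa using hs
      · exact hcur d h

theorem pvSplit_ok (s : String) : ∀ w ∈ PySem.Str.split₀ s, pvOK w.toList := by
  intro w hw
  have : w.toList ∈ List.map String.toList (PySem.Str.split₀ s) := List.mem_map_of_mem hw
  rw [PySem.Str.split₀_map_toList] at this
  exact pvSplitGo_ok s.toList [] [] (by simp) (by simp) _ this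

-- both ports compute the canonical string
theorem pvA_canon (bs : List Int) (t : String) :
    (insert_turns t bs).toList =
      (match PySem.Str.split₀ t with
       | [] => []
       | w :: ws => w.toList ++ pvTail bs 1 ws) := by
  rw [insert_turns]
  rw [PySem.Str.toList_replace, PySem.Str.toList_join]
  have hpat : (" \n " : String).toList = [' ', '\n', ' '] := rfl
  have hnew : ("\n" : String).toList = ['\n'] := rfl
  rw [hpat, hnew, pvReplace_eq]
  have hfold : ∀ (E : List (Int × String)),
      E.foldl (fun (acc : List String) iw =>
        if decide (iw.1 ∈ PySem.Set.ofList bs) && decide (0 < iw.1)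
        then acc ++ ["\n", iw.2] else acc ++ [iw.2]) [] =
      E.flatMap (fun iw => if pvF bs iw.1 then [("\n" : String), iw.2] else [iw.2]) := by
    intro E
    have : (fun (acc : List String) (iw : Int × String) =>
        if decide (iw.1 ∈ PySem.Set.ofList bs) && decide (0 < iw.1)
        then acc ++ ["\n", iw.2] else acc ++ [iw.2]) =
        (fun acc iw => acc ++ (if pvF bs iw.1 then [("\n" : String), iw.2] else [iw.2])) := by
      funext acc iw
      by_cases h : pvF bs iw.1
      · rw [if_pos h, if_pos (by rw [pvF] at h; exact h)]
      · rw [if_neg h, if_neg (by rw [pvF] at h; exact h)]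
    rw [this, PySem.List.foldl_append_eq_flatMap]
    simp
  rw [hfold]
  cases hws : PySem.Str.split₀ t with
  | nil => simp [PySem.List.enumerate_nil, PySem.Chars.join_nil, pvRepl]
  | cons w ws =>
    rw [PySem.List.enumerate_cons]
    have h0 : pvF bs 0 = false := by simp [pvF]
    rw [List.flatMap_cons, h0]
    rw [if_neg (by simp)]
    have hsp : (" " : String).toList = [' '] := rfl
    rw [hsp]
    rw [List.singleton_append, List.map_cons, pvJoin_cons_flat]
    have hT : (List.map String.toList
        ((PySem.List.enumerate ws (0 + 1)).flatMap
          (fun iw => if pvF bs iw.1 then [("\n" : String), iw.2] else [iw.2]))).flatMap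
        (fun x => [' '] ++ x) = pvT bs 1 ws := by
      rw [List.flatMap_map]
      have := pvA_tail bs ws 1
      simpa using this
    rw [hT]
    have hok : ∀ v ∈ ws, pvOK v.toList := by
      intro v hv
      exact pvSplit_ok t v (by rw [hws]; simp [hv])
    have hwok : pvOK w.toList := pvSplit_ok t w (by rw [hws]; simp)
    rw [pvRepl_word _ hwok.2, pvRepl_T bs ws 1 hok]

-- ===== B-side lemmas =====

-- the segment list B's fold produces from prev index p and remaining cuts cs
def pvSegs (words : List String) : Int → List Int → List String
  | p, [] => [PySem.Str.join " " (PySem.List.slice words (some p) none)]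
  | p, c :: cs =>
      PySem.Str.join " " (PySem.List.slice words (some p) (some c)) :: pvSegs words c cs

-- B's fold, plus the final segment, builds exactly pvSegs
theorem pvFold_segs (words : List String) (cs : List Int) :
    ∀ (acc : List String) (p : Int),
      (let st := cs.foldl
          (fun (st : List String × Int) b =>
            (st.1 ++ [PySem.Str.join " " (PySem.List.slice words (some st.2) (some b))], b))
          (acc, p);
       st.1 ++ [PySem.Str.join " " (PySem.List.slice words (some st.2) none)]) =
      acc ++ pvSegs words p cs := by
  induction cs with
  | nil => intro acc p; simp [pvSegs]
  | cons c cs ih =>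
    intro acc p
    simp only [List.foldl_cons]
    rw [ih]
    simp [pvSegs]

theorem pvSegs_ne_nil (words : List String) (p : Int) (cs : List Int) :
    pvSegs words p cs ≠ [] := by
  cases cs <;> simp [pvSegs]

-- pvTail over a stretch with no cuts is just spaces
theorem pvTail_spaces (bs : List Int) : ∀ (ws : List String) (i : Int),
    (∀ j : Int, i ≤ j → j < i + ws.length → pvF bs j = false) →
    pvTail bs i ws = ws.flatMap (fun w => ' ' :: w.toList) := by
  intro ws
  induction ws with
  | nil => intro i _; simp [pvTail]
  | cons w ws ih =>
    intro i h
    rw [pvTail, if_neg (by simp [h i le_rfl (by simp only [List.length_cons]; push_cast; omega)])]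
    rw [ih (i + 1) (fun j h1 h2 => h j (by omega) (by simp at h2 ⊢; omega))]
    simp

-- pvTail splits at a list split
theorem pvTail_split (bs : List Int) : ∀ (xs ys : List String) (i : Int),
    pvTail bs i (xs ++ ys) = pvTail bs i xs ++ pvTail bs (i + xs.length) ys := by
  intro xs
  induction xs with
  | nil => intro ys i; simp [pvTail]
  | cons x xs ih =>
    intro ys i
    rw [List.cons_append, pvTail, pvTail, ih]
    simp only [List.length_cons]
    have : i + 1 + (xs.length : Int) = i + ((xs.length : Int) + 1) := by omega
    rw [this]
    simp

-- main invariant: pvSegs, newline-joined, is the word at p followed by pvTail from p+1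
theorem pvSegs_canon (bs : List Int) (words : List String) :
    ∀ (cs : List Int) (p : Int) (w : String) (rest : List String),
      0 ≤ p → words.drop p.toNat = w :: rest →
      cs.Pairwise (· < ·) →
      (∀ c ∈ cs, p < c ∧ c < (words.length : Int)) →
      (∀ i : Int, p < i → i < (words.length : Int) →
        (i ∈ cs ↔ i ∈ PySem.Set.ofList bs)) →
      PySem.Chars.join ['\n'] ((pvSegs words p cs).map String.toList) =
        w.toList ++ pvTail bs (p + 1) rest := by
  intro cs
  induction cs with
  | nil =>
    intro p w rest hp hd _ _ hmem
    rw [pvSegs]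
    rw [PySem.List.slice_from _ hp, hd]
    simp only [List.map_cons, List.map_nil]
    rw [PySem.Chars.join_singleton, PySem.Str.toList_join]
    have hsp : (" " : String).toList = [' '] := rfl
    rw [hsp, List.map_cons, pvJoin_cons_flat]
    rw [pvTail_spaces bs rest (p + 1) ?_]
    · rw [List.flatMap_map]; simp
    · intro j h1 h2
      have hlen : p.toNat + (1 + rest.length) ≤ words.length := by
        have := List.length_drop (l := words) (i := p.toNat)
        rw [hd] at this
        simp at this
        omega
      have hjn : j < (words.length : Int) := by
        push_cast at hlen ⊢
        omega
      have := hmem j (by omega) hjn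
      simp at this
      simp [pvF, this]
  | cons c cs ih =>
    intro p w rest hp hd hpw hbnd hmem
    have hpc : p < c ∧ c < (words.length : Int) := hbnd c (by simp)
    have hc0 : 0 ≤ c := by omega
    -- lengths
    have hlen : words.length - p.toNat = 1 + rest.length := by
      have := List.length_drop (l := words) (i := p.toNat)
      rw [hd] at this
      simp at this
      omega
    have hple : p.toNat < words.length := by omega
    have hcn : c.toNat < words.length := by omega
    have hpcn : p.toNat < c.toNat := by omega
    -- the middle stretch and the word at c
    set k : Nat := c.toNat - p.toNat - 1 with hk
    have hkrest : k < rest.length := by omega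
    obtain ⟨wc, restc, hdc⟩ : ∃ wc restc, words.drop c.toNat = wc :: restc := by
      cases hdc : words.drop c.toNat with
      | nil => exfalso; have := List.length_drop (l := words) (i := c.toNat); rw [hdc] at this; simp at this; omega
      | cons a b => exact ⟨a, b, rfl⟩
    have hdropk : rest.drop k = wc :: restc := by
      have : words.drop c.toNat = (words.drop p.toNat).drop (c.toNat - p.toNat) := by
        rw [List.drop_drop]; congr 1; omega
      rw [hd] at this
      have h2 : (w :: rest).drop (c.toNat - p.toNat) = rest.drop k := by
        have : c.toNat - p.toNat = k + 1 := by omega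
        rw [this]; simp
      rw [this, h2] at hdc
      exact hdc
    -- unfold one segment
    rw [pvSegs, List.map_cons]
    rcases hsne : pvSegs words c cs with _ | ⟨s0, srest⟩
    · exact absurd hsne (pvSegs_ne_nil words c cs)
    rw [List.map_cons, PySem.Chars.join_cons_cons]
    have hihmem : ∀ i : Int, c < i → i < (words.length : Int) → (i ∈ cs ↔ i ∈ PySem.Set.ofList bs) := by
      intro i h1 h2
      have hthis := hmem i (by omega) h2
      rw [List.mem_cons] at hthis
      constructor
      · intro h; exact hthis.mp (Or.inr h)
      · intro h; rcases hthis.mpr h with h' | h'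
        · exfalso; omega
        · exact h'
    have hih := ih c wc restc hc0 hdc (List.pairwise_cons.mp hpw).2
      (fun x hx => ⟨((List.pairwise_cons.mp hpw).1 x hx), (hbnd x (by simp [hx])).2⟩) hihmem
    -- hih was stated via Pairwise tail; fix: recompute directly
    rw [hsne, List.map_cons] at hih
    rw [hih]
    -- first segment: words[p:c]
    rw [PySem.List.slice_toNat _ hp hc0, hd]
    have hkc : c.toNat - p.toNat = k + 1 := by omega
    rw [hkc, List.take_succ_cons]
    rw [PySem.Str.toList_join]
    have hsp : (" " : String).toList = [' '] := rfl
    rw [hsp, List.map_cons, pvJoin_cons_flat, List.flatMap_map]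
    -- decompose rest = take k ++ wc :: restc and pvTail accordingly
    have hrest : rest = rest.take k ++ (wc :: restc) := by
      rw [← hdropk, List.take_append_drop]
    conv_rhs => rw [hrest]
    rw [pvTail_split]
    have hlk : ((rest.take k).length : Int) = k := by
      simp [List.length_take]; omega
    rw [hlk]
    have hpk : p + 1 + (k : Int) = c := by omega
    rw [hpk]
    -- middle stretch has no cuts
    have hmid : pvTail bs (p + 1) (rest.take k) = (rest.take k).flatMap (fun v => ' ' :: v.toList) := by
      apply pvTail_spaces
      intro j h1 h2
      rw [hlk] at h2
      have hjc : j < c := by omega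
      have hjn : j < (words.length : Int) := by omega
      have hnotc : j ∉ (c :: cs) := by
        intro hj
        rcases List.mem_cons.mp hj with h' | h'
        · omega
        · have := (List.pairwise_cons.mp hpw).1 j h'; omega
      have := hmem j (by omega) hjn
      have : j ∉ PySem.Set.ofList bs := fun hjb => hnotc (this.mpr hjb)
      simp [pvF, this]
    rw [hmid]
    -- cut at c: pvF bs c = true
    have hcF : pvF bs c = true := by
      have hcin : c ∈ PySem.Set.ofList bs := (hmem c hpc.1 hpc.2).mp (by simp)
      simp [pvF, hcin]
      omega
    rw [pvTail, if_pos hcF]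
    simp [List.append_assoc]

theorem pvB_main (bs : List Int) (words : List String) :
    (PySem.Str.join "\n" (pvSegs words 0
      (PySem.List.sorted
        (PySem.Set.ofList (bs.filter
          (fun b => decide (0 < b) && decide (b < PySem.List.len words)))) (fun x => x) false))).toList =
      (match words with
       | [] => []
       | w :: ws => w.toList ++ pvTail bs 1 ws) := by
  cases hws : words with
  | nil =>
    have hf : bs.filter
        (fun b => decide (0 < b) && decide (b < PySem.List.len ([] : List String))) = [] := by
      rw [List.filter_eq_nil_iff]
      intro b _
      simp [PySem.List.len_eq]
      omega
    rw [hf]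
    rfl
  | cons w ws =>
    set cuts := PySem.List.sorted
      (PySem.Set.ofList (bs.filter
        (fun b => decide (0 < b) && decide (b < PySem.List.len (w :: ws))))) (fun x => x) false with hcuts
    have hpw : cuts.Pairwise (· < ·) := by
      rw [hcuts]; exact PySem.List.sorted_ofList_pairwise_lt _
    have hmemc : ∀ i : Int, i ∈ cuts ↔ (i ∈ bs ∧ 0 < i ∧ i < ((w :: ws).length : Int)) := by
      intro i
      rw [hcuts, PySem.List.mem_sorted, PySem.Set.mem_ofList, List.mem_filter]
      simp [PySem.List.len_eq]
    rw [PySem.Str.toList_join]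
    have hnl : ("\n" : String).toList = ['\n'] := rfl
    rw [hnl]
    rw [pvSegs_canon bs (w :: ws) cuts 0 w ws (by norm_num) (by simp) hpw
      (fun c hc => by have := (hmemc c).mp hc; exact ⟨this.2.1, this.2.2⟩)
      (fun i h1 h2 => by
        rw [hmemc i, PySem.Set.mem_ofList]
        constructor
        · intro h; exact h.1
        · intro h; exact ⟨h, h1, h2⟩)]
    norm_num

theorem pvB_canon (bs : List Int) (t : String) :
    (insert_turns_alt t bs).toList =
      (match PySem.Str.split₀ t with
       | [] => []
       | w :: ws => w.toList ++ pvTail bs 1 ws) := by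
  simp only [insert_turns_alt]
  rw [pvFold_segs, List.nil_append]
  exact pvB_main bs (PySem.Str.split₀ t)

-- ===== VERDICT (by name: the statement is the Claim_ definition above) =====
theorem insert_turns_spec : Claim_equal_insert_turns := by
  intro t bs _
  unfold Spec_insert_turns
  apply String.toList_inj.mp
  rw [pvA_canon, pvB_canon]
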